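-- pv_equiv track=rewrite | github.com/kinoasm/dailyPS | 프로그래머스/unrated/135808. 과일 장수/과일 장수.py | solution
-- ===== SOURCE A (Python) =====
-- def solution(k, m, score):
--     answer = 0
--     sortedApple=sorted(score,reverse=True)
--     i=-1
--     while i<len(score)-m:
--         i+=m
--         answer+=sortedApple[i]*m
--     return answer
-- ===== SOURCE B (Python) =====
-- def solution(k, m, score):
--     # Frequency-count the scores, then walk distinct values in ascending order,
--     # computing arithmetically how many picked positions (i % m == r) fall in each
--     # value's block of the sorted order -- no per-element indexing at all.
--     r = len(score) % m
--     freq = {}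
--     for v in score:
--         freq[v] = freq.get(v, 0) + 1
--     total = 0
--     pos = 0
--     for v in sorted(freq):
--         c = freq[v]
--         picks = (pos + c - r + m - 1) // m - (pos - r + m - 1) // m
--         total += v * picks
--         pos += c
--     return total * m
-- ===== Notes on version B (the rewrite author's own statement) =====
-- stated objective: alternative
-- what changed: A sorts the whole list descending and walks a while-loop reading every m-th element by index; B never indexes the sorted list: it builds a frequency dictionary, walks the distinct values in ascending order, and for each value's block of the sorted order computes arithmetically (two floor divisions) how many picked positions i with i % m == len(score) % m fall inside it.
-- outside the precondition, e.g. on solution(3, 0, [1, 2]): A does not finish within the time limit, B raises ZeroDivisionError; on solution(3, -1, [1, 2]): A raises IndexError, B returns 3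
import Mathlib
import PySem

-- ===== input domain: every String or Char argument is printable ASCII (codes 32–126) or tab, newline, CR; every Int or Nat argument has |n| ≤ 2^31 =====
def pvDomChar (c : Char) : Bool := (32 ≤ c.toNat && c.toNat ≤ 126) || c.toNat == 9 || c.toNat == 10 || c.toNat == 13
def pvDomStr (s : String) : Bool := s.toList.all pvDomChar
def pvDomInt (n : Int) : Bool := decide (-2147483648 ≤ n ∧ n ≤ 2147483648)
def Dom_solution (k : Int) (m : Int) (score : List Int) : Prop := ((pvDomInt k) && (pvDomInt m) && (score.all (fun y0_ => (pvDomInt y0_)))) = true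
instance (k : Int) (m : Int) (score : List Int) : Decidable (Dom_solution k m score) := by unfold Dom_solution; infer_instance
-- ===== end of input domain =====

-- B replaces A's descending sort + index-stepping while-loop by a frequency dictionary:
-- it walks the distinct values in ascending order and, for each value's block of the sorted
-- order, counts the picked positions (i % m == len(score) % m) with two floor divisions.

-- ===== PORT A =====
-- A's while loop: state (i, answer); fuel score.length + 1 covers all iterations when m ≥ 1
def solutionLoop (sortedApple : List Int) (n m : Int) : Nat → Int → Int → Int
  | 0, _, ans => ans
  | fuel+1, i, ans =>
    if i < n - m then
      solutionLoop sortedApple n m fuel (i + m)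
        (ans + PySem.List.pyGetD sortedApple (i + m) 0 * m)
    else ans

def solution (k : Int) (m : Int) (score : List Int) : Int :=
  let sortedApple := PySem.List.sorted score (fun x => x) true
  solutionLoop sortedApple (score.length : Int) m (score.length + 1) (-1) 0

-- ===== PORT B =====
def solution_alt (k : Int) (m : Int) (score : List Int) : Int :=
  let r := PySem.Int.mod (score.length : Int) m
  let freq := score.foldl (fun d v => d.insert v (d.getD v 0 + 1)) (PySem.Dict.empty : PySem.Dict Int Int)
  let res := (PySem.List.sorted freq.keys (fun x => x) false).foldl
    (fun (st : Int × Int) v =>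
      let c := freq.getD v 0
      let picks := PySem.Int.floordiv (st.2 + c - r + m - 1) m
                   - PySem.Int.floordiv (st.2 - r + m - 1) m
      (st.1 + v * picks, st.2 + c)) (0, 0)
  res.1 * m

-- ===== PRECONDITION & SPEC =====
-- Pre_ excludes m ≤ 0, where the Python A never returns: m = 0 loops forever (or IndexError
-- on an empty list) and m < 0 always ends in IndexError; B raises ZeroDivisionError at m = 0
-- and returns a value at m < 0.
def Pre_solution (k : Int) (m : Int) (score : List Int) : Prop := 1 ≤ m
instance (k : Int) (m : Int) (score : List Int) : Decidable (Pre_solution k m score) := by unfold Pre_solution; infer_instance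
def pvWitness_solution : Int × Int × List Int := (4, 3, [1, 2, 3, 1, 2, 3, 1])

def Spec_solution (k : Int) (m : Int) (score : List Int) (out : Int) : Prop := out = solution_alt k m score
instance (k : Int) (m : Int) (score : List Int) (out : Int) : Decidable (Spec_solution k m score out) := by unfold Spec_solution; infer_instance

-- ===== CLAIM (what is proved, stated in full; the proofs are below) =====
def Claim_equal_solution : Prop := ∀ (k : Int) (m : Int) (score : List Int), Dom_solution k m score → Pre_solution k m score → Spec_solution k m score (solution k m score)

-- ===== LEMMAS AND PROOFS =====

-- B's per-block pick count, as an Int function of the position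
def gPick (m r x : Int) : Int := PySem.Int.floordiv (x - r + m - 1) m

-- proof-side view of B's loop: the sum of the elements at picked positions, walked one by one
def pickSum (m r : Int) : List Int → Int → Int
  | [], _ => 0
  | x :: xs, pos => (if pos % m = r then x else 0) + pickSum m r xs (pos + 1)

-- ediv steps by one exactly at multiples
lemma ediv_succ (m y : Int) (hm : 0 < m) :
    (y + 1) / m = y / m + (if (y + 1) % m = 0 then 1 else 0) := by
  have hy := Int.emod_add_ediv y m
  have h0 : 0 ≤ y % m := Int.emod_nonneg y (by omega)
  have h1 : y % m < m := Int.emod_lt_of_pos y hm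
  have hexp : m * (y / m + 1) = m * (y / m) + m := by ring
  by_cases he : y % m = m - 1
  · have heq : y + 1 = m * (y / m + 1) := by omega
    have hd : (y + 1) / m = y / m + 1 := by
      rw [heq, Int.mul_ediv_cancel_left _ (by omega : m ≠ 0)]
    have hmod : (y + 1) % m = 0 := by
      rw [heq, Int.mul_emod_right]
    simp [hd, hmod]
  · have hexp2 : (y / m) * m = m * (y / m) := by ring
    have heq : y + 1 = (y % m + 1) + (y / m) * m := by omega
    have hd : (y + 1) / m = y / m := by
      rw [heq, Int.add_mul_ediv_right _ _ (by omega : m ≠ 0),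
        Int.ediv_eq_zero_of_lt (by omega) (by omega)]
      omega
    have hmod : (y + 1) % m ≠ 0 := by
      rw [heq, hexp2, Int.add_mul_emod_self_left, Int.emod_eq_of_lt (by omega) (by omega)]
      omega
    simp [hd, hmod]

-- gPick steps by one exactly at picked positions
lemma gPick_succ (m r x : Int) (hm : 0 < m) (hr0 : 0 ≤ r) (hrm : r < m) :
    gPick m r (x + 1) = gPick m r x + (if x % m = r then 1 else 0) := by
  unfold gPick
  rw [PySem.Int.floordiv_eq_ediv_of_pos hm, PySem.Int.floordiv_eq_ediv_of_pos hm]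
  have h1 : x + 1 - r + m - 1 = (x - r + m - 1) + 1 := by ring
  rw [h1, ediv_succ _ _ hm]
  congr 1
  have hcond : (x - r + m - 1 + 1) % m = 0 ↔ x % m = r := by
    have h2 : x - r + m - 1 + 1 = (x - r) + m * 1 := by ring
    rw [h2, Int.add_mul_emod_self_left, Int.sub_emod, Int.emod_eq_of_lt hr0 hrm]
    have hx0 : 0 ≤ x % m := Int.emod_nonneg x (by omega)
    have hx1 : x % m < m := Int.emod_lt_of_pos x hm
    rw [EuclideanDomain.mod_eq_zero]
    constructor
    · intro h
      obtain ⟨c, hc⟩ := h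
      have hc0 : c = 0 := by nlinarith
      rw [hc0, mul_zero] at hc
      omega
    · intro h
      exact ⟨0, by omega⟩
  rw [if_congr hcond rfl rfl]

-- a block of c equal values contributes v * (gPick(pos+c) - gPick(pos))
lemma pickSum_replicate (m r v : Int) (hm : 0 < m) (hr0 : 0 ≤ r) (hrm : r < m) (c : Nat) :
    ∀ pos : Int, pickSum m r (List.replicate c v) pos = v * (gPick m r (pos + c) - gPick m r pos) := by
  induction c with
  | zero => intro pos; simp [pickSum, List.replicate]
  | succ c ih =>
    intro pos
    rw [List.replicate_succ]
    show (if pos % m = r then v else 0) + pickSum m r (List.replicate c v) (pos + 1) = _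
    rw [ih (pos + 1), gPick_succ m r pos hm hr0 hrm]
    have : pos + 1 + (c : Int) = pos + ((c + 1 : Nat) : Int) := by push_cast; ring
    rw [this]
    split_ifs <;> ring

lemma pickSum_append (m r : Int) (l1 l2 : List Int) :
    ∀ pos, pickSum m r (l1 ++ l2) pos = pickSum m r l1 pos + pickSum m r l2 (pos + l1.length) := by
  induction l1 with
  | nil => intro pos; simp [pickSum]
  | cons x xs ih =>
    intro pos
    simp only [List.cons_append, pickSum, ih (pos + 1), List.length_cons]
    push_cast
    ring_nf

-- B's fold over the distinct values computes pickSum of the block decomposition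
lemma foldl_blocks (m r : Int) (hm : 0 < m) (hr0 : 0 ≤ r) (hrm : r < m) (cnt : Int → Nat) :
    ∀ (vs : List Int) (total pos : Int),
      (vs.foldl (fun (st : Int × Int) v =>
          (st.1 + v * (gPick m r (st.2 + (cnt v : Int)) - gPick m r st.2), st.2 + (cnt v : Int)))
        (total, pos)).1
      = total + pickSum m r (vs.flatMap (fun v => List.replicate (cnt v) v)) pos := by
  intro vs
  induction vs with
  | nil => intro total pos; simp [pickSum]
  | cons v vs ih =>
    intro total pos
    simp only [List.foldl_cons, List.flatMap_cons]
    rw [ih, pickSum_append, pickSum_replicate m r v hm hr0 hrm]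
    simp [add_assoc]

-- sorted score (ascending) IS the flatMap of replicated counts over the sorted distinct values
-- counts in a block decomposition over distinct values
lemma count_flatMap_replicate (vs : List Int) (c : Int → Nat) (hnd : vs.Nodup) (x : Int) :
    (vs.flatMap (fun v => List.replicate (c v) v)).count x = if x ∈ vs then c x else 0 := by
  induction vs with
  | nil => simp
  | cons v vs ih =>
    simp only [List.flatMap_cons, List.count_append, List.count_replicate]
    rw [ih hnd.of_cons]
    by_cases hxv : x = v
    · subst hxv
      have hxnot : x ∉ vs := (List.nodup_cons.mp hnd).1
      simp [hxnot]
    · simp [hxv, Ne.symm hxv, List.mem_cons]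

-- blocks over strictly increasing values are sorted
lemma pairwise_flatMap_replicate (vs : List Int) (c : Int → Nat)
    (hlt : vs.Pairwise (· < ·)) :
    (vs.flatMap (fun v => List.replicate (c v) v)).Pairwise (· ≤ ·) := by
  induction vs with
  | nil => simp
  | cons v vs ih =>
    simp only [List.flatMap_cons]
    rw [List.pairwise_append]
    refine ⟨List.pairwise_replicate.mpr (Or.inr le_rfl), ih (hlt.of_cons), ?_⟩
    intro a ha b hb
    have hav : a = v := List.eq_of_mem_replicate ha
    obtain ⟨u, hu, hbu⟩ := List.mem_flatMap.mp hb
    have hbu' : b = u := List.eq_of_mem_replicate hbu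
    have hvu : v < u := (List.pairwise_cons.mp hlt).1 u hu
    omega

lemma sorted_eq_flatMap (score : List Int) :
    PySem.List.sorted score (fun x => x) false
      = (PySem.List.sorted (PySem.Set.ofList score) (fun x => x) false).flatMap
          (fun v => List.replicate (score.count v) v) := by
  set s := PySem.List.sorted score (fun x => x) false with hs
  set vs := PySem.List.sorted (PySem.Set.ofList score) (fun x => x) false with hvs
  have hvs_perm : vs.Perm (PySem.Set.ofList score) := PySem.List.sorted_perm _ _ false
  have hvs_nodup : vs.Nodup := hvs_perm.nodup_iff.mpr (PySem.Set.nodup_ofList score)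
  have hvs_mem : ∀ x, x ∈ vs ↔ x ∈ score := by
    intro x
    rw [hvs_perm.mem_iff, PySem.Set.mem_ofList]
  have hvs_lt : vs.Pairwise (· < ·) := by
    have h1 : vs.Pairwise (· ≤ ·) := PySem.List.sorted_pairwise _ _
    have h2 : vs.Pairwise (· ≠ ·) := hvs_nodup
    exact (h1.and h2).imp (fun h => lt_of_le_of_ne h.1 h.2)
  have hperm : ((vs.flatMap (fun v => List.replicate (score.count v) v))).Perm s := by
    rw [List.perm_iff_count]
    intro x
    rw [count_flatMap_replicate vs _ hvs_nodup x]
    have hcs : s.count x = score.count x := (PySem.List.sorted_perm score _ false).count_eq x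
    by_cases hx : x ∈ vs
    · simp [hx, hcs]
    · have : x ∉ score := fun hmem => hx ((hvs_mem x).mpr hmem)
      simp [hx, hcs, List.count_eq_zero.mpr this]
  have hsorted1 : (vs.flatMap (fun v => List.replicate (score.count v) v)).Pairwise (· ≤ ·) :=
    pairwise_flatMap_replicate vs _ hvs_lt
  have hsorted2 : s.Pairwise (· ≤ ·) := PySem.List.sorted_pairwise _ _
  exact (List.eq_of_perm_of_sorted (fun a b _ _ h1 h2 => le_antisymm h1 h2)
    hsorted1 hsorted2 hperm).symm

-- pickSum as a sum over all indices
lemma pickSum_eq_range (m r : Int) (l : List Int) :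
    ∀ pos, pickSum m r l pos
      = ((List.range l.length).map (fun (i : Nat) => if (pos + (i : Int)) % m = r then l.getD i 0 else 0)).sum := by
  induction l with
  | nil => intro pos; simp [pickSum]
  | cons x xs ih =>
    intro pos
    simp only [pickSum, List.length_cons, List.range_succ_eq_map, List.map_cons, List.map_map,
      List.sum_cons, ih (pos + 1)]
    norm_num [List.getElem?_cons_succ]
    congr 1
    apply List.map_congr_left
    intro i _
    simp only [Function.comp]
    have : pos + 1 + (i : Int) = pos + ((i : Nat) + 1 : Int) := by push_cast; ring
    push_cast
    ring_nf
    rw [show i.succ = i + 1 from rfl, List.getElem?_cons_succ]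

-- the indexed sum over all i < n with i % m = r equals the stepped sum over t < gPick(n)
lemma range_filtered_sum (m r : Int) (hm : 0 < m) (hr0 : 0 ≤ r) (hrm : r < m) (f : Int → Int) :
    ∀ n : Nat,
      ((List.range n).map (fun (i : Nat) => if ((i : Int)) % m = r then f (i : Int) else 0)).sum
        = ((List.range (gPick m r (n : Int)).toNat).map (fun (t : Nat) => f (r + m * (t : Int)))).sum := by
  intro n
  induction n with
  | zero =>
    have hg : gPick m r 0 = 0 := by
      unfold gPick
      rw [PySem.Int.floordiv_eq_ediv_of_pos hm, Int.ediv_eq_zero_of_lt (by omega) (by omega)]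
    simp [hg]
  | succ n ih =>
    have hg0 : 0 ≤ gPick m r (n : Int) := by
      unfold gPick
      rw [PySem.Int.floordiv_eq_ediv_of_pos hm]
      exact Int.ediv_nonneg (by omega) (by omega)
    have hstep : gPick m r ((n + 1 : Nat) : Int) = gPick m r (n : Int) + (if (n : Int) % m = r then 1 else 0) := by
      have : ((n + 1 : Nat) : Int) = (n : Int) + 1 := by push_cast; ring
      rw [this, gPick_succ m r (n : Int) hm hr0 hrm]
    rw [List.range_succ, List.map_append, List.sum_append]
    by_cases hc : (n : Int) % m = r
    · have hg1 : (gPick m r ((n + 1 : Nat) : Int)).toNat = (gPick m r (n : Int)).toNat + 1 := by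
        rw [hstep, if_pos hc]; omega
      have hidx : r + m * ((gPick m r (n : Int)).toNat : Int) = (n : Int) := by
        have hee := Int.emod_add_ediv (n : Int) m
        have hcomm : ((n : Int) / m) * m = m * ((n : Int) / m) := by ring
        have hd : (n : Int) - r = m * ((n : Int) / m) := by omega
        have hgv : gPick m r (n : Int) = (n : Int) / m := by
          unfold gPick
          rw [PySem.Int.floordiv_eq_ediv_of_pos hm]
          have hnum : (n : Int) - r + m - 1 = (m - 1) + ((n : Int) / m) * m := by omega
          rw [hnum, Int.add_mul_ediv_right _ _ (by omega : m ≠ 0),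
            Int.ediv_eq_zero_of_lt (by omega) (by omega)]
          omega
        rw [Int.toNat_of_nonneg hg0, hgv]
        omega
      rw [hg1, List.range_succ, List.map_append, List.sum_append, ih]
      simp only [List.map_cons, List.map_nil, List.sum_cons, List.sum_nil, add_zero, if_pos hc]
      rw [hidx]
    · have hg1 : (gPick m r ((n + 1 : Nat) : Int)).toNat = (gPick m r (n : Int)).toNat := by
        rw [hstep, if_neg hc]; omega
      rw [hg1, ih]
      simp [hc]

-- ===== A-side lemmas (as in the straightforward stepped-sum reading of A) =====

-- descending sort of ints is the reverse of the ascending sort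
lemma sorted_rev_eq_reverse (xs : List Int) :
    PySem.List.sorted xs (fun x => x) true = (PySem.List.sorted xs (fun x => x) false).reverse := by
  apply PySem.List.eq_of_perm_of_pairwise_le_of_injective (fun x : Int => -x) neg_injective
  · exact (PySem.List.sorted_perm xs _ true).trans
      ((PySem.List.sorted_perm xs _ false).symm.trans (List.reverse_perm _).symm)
  · exact (PySem.List.sorted_pairwise_rev xs _).imp (fun h => by omega)
  · exact List.pairwise_reverse.mpr ((PySem.List.sorted_pairwise xs _).imp (fun h => by omega))

-- A's loop from state i = j*m - 1 adds m times the picked entries at indices (j+1)m-1, (j+2)m-1, …, qm-1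
lemma solutionLoop_eq (r : List Int) (n m : Int) (q : Int)
    (hm : 1 ≤ m) (hq : q = PySem.Int.floordiv n m) (hn : 0 ≤ n) :
    ∀ (c : Nat) (j : Int) (ans : Int), 0 ≤ j → (q - j).toNat ≤ c →
      solutionLoop r n m c (j * m - 1) ans =
        ans + m * ((List.range (q - j).toNat).map
          (fun t : Nat => PySem.List.pyGetD r ((j + 1 + (t : Int)) * m - 1) 0)).sum := by
  have hq0 : 0 ≤ q := hq ▸ by
    have := PySem.Int.floordiv_eq_ediv_of_pos (a := n) (by omega : (0:Int) < m)
    rw [this]; positivity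
  have hbr : q * m ≤ n ∧ n < (q+1) * m := by
    have h := PySem.Int.floordiv_mul_add_mod n m
    have h1 := PySem.Int.mod_nonneg n (by omega : (0:Int) < m)
    have h2 := PySem.Int.mod_lt n (by omega : (0:Int) < m)
    constructor <;> nlinarith [h, h1, h2]
  intro c
  induction c with
  | zero =>
    intro j ans hj hc
    have : (q - j).toNat = 0 := by omega
    simp [solutionLoop, this]
  | succ c ih =>
    intro j ans hj hc
    by_cases hlt : j < q
    · have hcond : j * m - 1 < n - m := by nlinarith
      have htn : (q - j).toNat = (q - (j+1)).toNat + 1 := by omega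
      rw [solutionLoop, if_pos hcond]
      have harg : j * m - 1 + m = (j + 1) * m - 1 := by ring
      rw [harg, ih (j+1) _ (by omega) (by omega), htn, List.range_succ_eq_map]
      simp only [List.map_cons, List.map_map, List.sum_cons]
      have hfun : ((fun t : Nat => PySem.List.pyGetD r ((j + 1 + (t:Int)) * m - 1) 0) ∘ Nat.succ)
          = fun t : Nat => PySem.List.pyGetD r ((j + 1 + 1 + (t:Int)) * m - 1) 0 := by
        funext t
        simp only [Function.comp]
        congr 2
        push_cast
        ring
      rw [hfun]
      push_cast
      ring_nf
    · have hcond : ¬ (j * m - 1 < n - m) := by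
        intro h
        have h1 : (j + 1) * m ≤ n := by nlinarith
        have : j + 1 ≤ q := by nlinarith
        omega
      rw [solutionLoop, if_neg hcond]
      have : (q - j).toNat = 0 := by omega
      simp [this]

-- a finite sum read back to front
lemma sum_map_range_reflect (T : ℕ) (f : ℕ → ℤ) :
    ((List.range T).map f).sum = ((List.range T).map (fun t => f (T - 1 - t))).sum := by
  have h1 : ((List.range T).map f).sum = ∑ i ∈ Finset.range T, f i := rfl
  have h2 : ((List.range T).map (fun t => f (T-1-t))).sum = ∑ i ∈ Finset.range T, f (T-1-i) := rfl
  rw [h1, h2, Finset.sum_range_reflect]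

-- A equals m times the stepped sum over the ascending sort
lemma solution_eq_stepped (k m : Int) (score : List Int) (hm : 1 ≤ m) :
    solution k m score =
      ((List.range (PySem.Int.floordiv (score.length : Int) m).toNat).map
        (fun t : Nat => PySem.List.pyGetD (PySem.List.sorted score (fun x => x) false)
          (PySem.Int.mod (score.length : Int) m + m * (t : Int)) 0)).sum * m := by
  set s := PySem.List.sorted score (fun x => x) false with hs
  have hslen : s.length = score.length := (PySem.List.sorted_perm score _ false).length_eq
  set n : Int := (score.length : Int) with hn
  have hn0 : 0 ≤ n := by positivity
  set q : Int := PySem.Int.floordiv n m with hq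
  set a : Int := PySem.Int.mod n m with ha
  have hq0 : 0 ≤ q := by
    rw [hq, PySem.Int.floordiv_eq_ediv_of_pos (by omega)]; positivity
  have ha0 : 0 ≤ a := PySem.Int.mod_nonneg n (by omega)
  have ham : a < m := PySem.Int.mod_lt n (by omega)
  have hqa : q * m + a = n := PySem.Int.floordiv_mul_add_mod n m
  have hA : solution k m score =
      m * ((List.range q.toNat).map
        (fun t : Nat => PySem.List.pyGetD s.reverse ((0 + 1 + (t : Int)) * m - 1) 0)).sum := by
    show solutionLoop _ n m (score.length + 1) (-1) 0 = _
    rw [sorted_rev_eq_reverse, ← hs]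
    have hqn : q ≤ n := by nlinarith
    have h1 : (-1 : Int) = 0 * m - 1 := by ring
    rw [h1, solutionLoop_eq s.reverse n m q hm hq hn0 (score.length + 1) 0 0 le_rfl (by omega)]
    simp
  rw [hA]
  rw [sum_map_range_reflect q.toNat (fun t : Nat => PySem.List.pyGetD s (a + m * (t : Int)) 0)]
  rw [mul_comm]
  congr 1
  congr 1
  apply List.map_congr_left
  intro t ht
  rw [List.mem_range] at ht
  have hidx1 : (0 + 1 + (t:Int)) * m - 1 = n - 1 - (a + m * ((q.toNat : Int) - 1 - t)) := by
    push_cast [Int.toNat_of_nonneg hq0]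
    nlinarith
  have hb1 : 0 ≤ a + m * ((q.toNat : Int) - 1 - (t:Int)) := by
    have : (t:Int) < q := by omega
    nlinarith
  have hb2 : a + m * ((q.toNat : Int) - 1 - (t:Int)) < n := by
    have : (t:Int) < q := by omega
    nlinarith
  have hrev : ∀ (i : Int), 0 ≤ i → i < n →
      PySem.List.pyGetD s.reverse (n - 1 - i) 0 = PySem.List.pyGetD s i 0 := by
    intro i h0 h1
    rw [PySem.List.pyGetD_eq_getElem _ _ (by omega) (by simp [hslen]; omega),
        PySem.List.pyGetD_eq_getElem _ _ h0 (by rw [hslen]; omega)]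
    rw [List.getElem_reverse]
    congr 1
    simp [hslen]
    omega
  have hcast : ((q.toNat - 1 - t : Nat) : Int) = (q.toNat : Int) - 1 - (t : Int) := by
    omega
  rw [hidx1, hrev _ hb1 hb2, hcast]

-- B equals the same stepped sum
lemma solution_alt_eq_stepped (k m : Int) (score : List Int) (hm : 1 ≤ m) :
    solution_alt k m score =
      ((List.range (PySem.Int.floordiv (score.length : Int) m).toNat).map
        (fun t : Nat => PySem.List.pyGetD (PySem.List.sorted score (fun x => x) false)
          (PySem.Int.mod (score.length : Int) m + m * (t : Int)) 0)).sum * m := by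
  set s := PySem.List.sorted score (fun x => x) false with hs
  have hslen : s.length = score.length := (PySem.List.sorted_perm score _ false).length_eq
  set n : Int := (score.length : Int) with hn
  have hn0 : 0 ≤ n := by positivity
  set q : Int := PySem.Int.floordiv n m with hq
  set r : Int := PySem.Int.mod n m with hr
  have hr0 : 0 ≤ r := PySem.Int.mod_nonneg n (by omega)
  have hrm : r < m := PySem.Int.mod_lt n (by omega)
  have hqr : q * m + r = n := PySem.Int.floordiv_mul_add_mod n m
  have hm0 : (0 : Int) < m := by omega
  unfold solution_alt
  simp only [← hn, ← hr]
  set freq := score.foldl (fun d v => d.insert v (d.getD v 0 + 1)) (PySem.Dict.empty : PySem.Dict Int Int) with hfreq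
  have hgetD : ∀ v, freq.getD v 0 = (score.count v : Int) := by
    intro v
    rw [hfreq, PySem.Dict.getD_foldl_insert_add_one, PySem.Dict.getD_empty, zero_add]
  have hkeys : freq.keys = PySem.Set.ofList score := by
    rw [hfreq, PySem.Dict.keys_foldl_insert]
    rfl
  rw [hkeys]
  set vs := PySem.List.sorted (PySem.Set.ofList score) (fun x => x) false with hvs
  have hstepf :
      (fun (st : Int × Int) v =>
        ((st.1 + v * (PySem.Int.floordiv (st.2 + freq.getD v 0 - r + m - 1) m
            - PySem.Int.floordiv (st.2 - r + m - 1) m), st.2 + freq.getD v 0) : Int × Int))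
      = (fun (st : Int × Int) v =>
        (st.1 + v * (gPick m r (st.2 + ((score.count v : Nat) : Int)) - gPick m r st.2),
         st.2 + ((score.count v : Nat) : Int))) := by
    funext st v
    rw [hgetD v]
    rfl
  rw [hstepf, foldl_blocks m r hm0 hr0 hrm (fun v => score.count v) vs 0 0, zero_add,
    ← sorted_eq_flatMap score, ← hs, pickSum_eq_range m r s 0]
  congr 1
  have hlen : s.length = n.toNat := by rw [hslen]; omega
  rw [hlen]
  have hforms :
      ((List.range n.toNat).map (fun (i : Nat) => if ((0 : Int) + (i : Int)) % m = r then s.getD i 0 else 0)).sum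
        = ((List.range n.toNat).map (fun (i : Nat) => if ((i : Int)) % m = r
            then PySem.List.pyGetD s (i : Int) 0 else 0)).sum := by
    congr 1
    apply List.map_congr_left
    intro i _
    rw [zero_add, PySem.List.pyGetD_natCast]
  rw [hforms,
    range_filtered_sum m r hm0 hr0 hrm (fun i => PySem.List.pyGetD s i 0) n.toNat]
  have hgq : gPick m r ((n.toNat : Nat) : Int) = q := by
    unfold gPick
    rw [PySem.Int.floordiv_eq_ediv_of_pos hm0]
    have hcast : ((n.toNat : Nat) : Int) = n := by omega
    rw [hcast]
    have hnum : n - r + m - 1 = (m - 1) + q * m := by omega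
    rw [hnum, Int.add_mul_ediv_right _ _ (by omega : m ≠ 0),
      Int.ediv_eq_zero_of_lt (by omega) (by omega)]
    omega
  rw [hgq]

-- ===== VERDICT (by name: the statement is the Claim_ definition above) =====
theorem solution_spec : Claim_equal_solution := by
  intro k m score _ hm
  unfold Spec_solution
  rw [solution_eq_stepped k m score hm, solution_alt_eq_stepped k m score hm]
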